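-- pv_equiv track=rewrite | github.com/jeff-donovan/aoc-2024 | 24/24.2_attempt2.py | get_possible_output_swaps
-- ===== SOURCE A (Python) =====
-- def get_possible_output_swaps(gates, output):
--     gate = next((gate for gate in gates if gate[-1] == output), None)
--     if gate is None:
--         return set([])
--
--     swaps = set([])
--     (command, x, y, z) = gate
--
--     number = None
--     if z.startswith('z'):
--         number = z[1:]
--     x_number = None
--     y_number = None
--     if number is not None:
--         x_number = 'x' + number
--         y_number = 'y' + number
--
--     for possible_swap_gate in gates:
--         # consider same x/y
--         (swap_command, swap_x, swap_y, swap_z) = possible_swap_gate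
--         if (x == swap_x) or (x == swap_y):
--             if z != swap_z:
--                 swaps.add(swap_z)
--
--         if (y == swap_x) or (y == swap_y):
--             if z != swap_z:
--                 swaps.add(swap_z)
--
--         # consider x00/y00 inputs when output is z00
--         if (x_number == swap_x) or (x_number == swap_y):
--             if z != swap_z:
--                 swaps.add(swap_z)
--
--         if (y_number == swap_x) or (y_number == swap_y):
--             if z != swap_z:
--                 swaps.add(swap_z)
--
--     return swaps
-- ===== SOURCE B (Python) =====
-- def get_possible_output_swaps(gates, output):
--     gate = next((g for g in gates if g[-1] == output), None)
--     if gate is None: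
--         return set()
--     (_command, x, y, z) = gate
--
--     targets = [x, y]
--     if z.startswith('z'):
--         number = z[1:]
--         targets.append('x' + number)
--         targets.append('y' + number)
--
--     # inverted index: input wire -> indices of the gates that read it
--     index = {}
--     for i, (_c, sx, sy, _sz) in enumerate(gates):
--         index.setdefault(sx, []).append(i)
--         index.setdefault(sy, []).append(i)
--
--     hits = set()
--     for t in targets:
--         hits.update(index.get(t, []))
--
--     return {gates[i][3] for i in sorted(hits) if gates[i][3] != z}
-- ===== Notes on version B (the rewrite author's own statement) =====
-- stated objective: alternative
-- what changed: Replaces A's direct scan that compares each gate's two inputs against up to four target wires with an inverted index (input wire -> gate indices) built in one pass, a union of index lookups for the target wires, and a sorted gather of the hit gates' outputs.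
import Mathlib
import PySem

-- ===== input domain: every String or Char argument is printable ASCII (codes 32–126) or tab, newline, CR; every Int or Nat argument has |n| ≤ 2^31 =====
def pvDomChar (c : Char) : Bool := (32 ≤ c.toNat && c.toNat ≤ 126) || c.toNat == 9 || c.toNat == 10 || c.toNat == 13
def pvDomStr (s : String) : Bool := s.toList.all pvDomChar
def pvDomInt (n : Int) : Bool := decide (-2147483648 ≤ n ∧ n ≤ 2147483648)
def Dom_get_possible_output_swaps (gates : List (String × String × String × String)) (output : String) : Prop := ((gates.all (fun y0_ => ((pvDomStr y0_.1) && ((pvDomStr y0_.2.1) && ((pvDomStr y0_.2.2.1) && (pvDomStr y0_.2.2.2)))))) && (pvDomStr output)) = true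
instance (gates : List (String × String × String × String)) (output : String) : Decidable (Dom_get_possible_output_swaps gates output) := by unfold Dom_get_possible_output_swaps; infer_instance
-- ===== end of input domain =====

-- B replaces A's scan-and-compare with an inverted index (input wire -> gate indices), a union of
-- lookups for the target wires and a sorted gather; objective: alternative (same result, different shape).

-- ===== PORT A =====
-- the body of A's for-loop: four conditional set-adds, in A's order
def pvAstep (x y z : String) (x_number y_number : Option String)
    (swaps : List String) (g : String × String × String × String) : List String :=
  let sx := g.2.1
  let sy := g.2.2.1
  let sz := g.2.2.2
  let s1 := if x == sx || x == sy then (if z != sz then PySem.Set.add swaps sz else swaps) else swaps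
  let s2 := if y == sx || y == sy then (if z != sz then PySem.Set.add s1 sz else s1) else s1
  let s3 := if x_number == some sx || x_number == some sy then (if z != sz then PySem.Set.add s2 sz else s2) else s2
  if y_number == some sx || y_number == some sy then (if z != sz then PySem.Set.add s3 sz else s3) else s3

def get_possible_output_swaps (gates : List (String × String × String × String)) (output : String) : List String :=
  match gates.find? (fun g => g.2.2.2 == output) with
  | none => PySem.Set.empty
  | some gate =>
      let x := gate.2.1
      let y := gate.2.2.1
      let z := gate.2.2.2
      let number : Option String :=
        if PySem.Str.startswith z "z" then some (PySem.Str.slice z (some 1) none) else none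
      let x_number : Option String := number.map (fun n => "x" ++ n)
      let y_number : Option String := number.map (fun n => "y" ++ n)
      gates.foldl (pvAstep x y z x_number y_number) PySem.Set.empty

-- ===== PORT B =====
-- index.setdefault(sx, []).append(i); index.setdefault(sy, []).append(i)
def pvIndexStep (d : PySem.Dict String (List Int))
    (p : Int × (String × String × String × String)) : PySem.Dict String (List Int) :=
  let d1 := d.modify p.2.2.1 [] (fun l => l ++ [p.1])
  d1.modify p.2.2.2.1 [] (fun l => l ++ [p.1])

def get_possible_output_swaps_alt (gates : List (String × String × String × String)) (output : String) : List String :=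
  match gates.find? (fun g => g.2.2.2 == output) with
  | none => PySem.Set.empty
  | some gate =>
      let x := gate.2.1
      let y := gate.2.2.1
      let z := gate.2.2.2
      let targets : List String :=
        if PySem.Str.startswith z "z" then
          [x, y, "x" ++ PySem.Str.slice z (some 1) none, "y" ++ PySem.Str.slice z (some 1) none]
        else [x, y]
      let index : PySem.Dict String (List Int) :=
        (PySem.List.enumerate gates 0).foldl pvIndexStep PySem.Dict.empty
      let hits : PySem.Set Int :=
        targets.foldl (fun s t => PySem.Set.update s (index.getD t [])) PySem.Set.empty
      -- {gates[i][3] for i in sorted(hits) if gates[i][3] != z}; every i in hits is a valid index,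
      -- so pyGetD's default is never read
      (PySem.List.sorted hits (fun i => i) false).foldl
        (fun res i =>
          if (PySem.List.pyGetD gates i ("", "", "", "")).2.2.2 != z
            then PySem.Set.add res ((PySem.List.pyGetD gates i ("", "", "", "")).2.2.2) else res)
        PySem.Set.empty

-- ===== PRECONDITION & SPEC =====
def Spec_get_possible_output_swaps (gates : List (String × String × String × String)) (output : String) (out : List String) : Prop := out = get_possible_output_swaps_alt gates output
instance (gates : List (String × String × String × String)) (output : String) (out : List String) : Decidable (Spec_get_possible_output_swaps gates output out) := by unfold Spec_get_possible_output_swaps; infer_instance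

-- ===== CLAIM (what is proved, stated in full; the proofs are below) =====
def Claim_equal_get_possible_output_swaps : Prop := ∀ (gates : List (String × String × String × String)) (output : String), Dom_get_possible_output_swaps gates output → Spec_get_possible_output_swaps gates output (get_possible_output_swaps gates output)

-- ===== LEMMAS AND PROOFS =====

-- the gate matches some target wire of T
def pvMatch (T : List String) (g : String × String × String × String) : Bool :=
  T.contains g.2.1 || T.contains g.2.2.1
def pvCond (T : List String) (z : String) (g : String × String × String × String) : Bool :=
  pvMatch T g && (g.2.2.2 != z)

theorem pv_foldl_condAdd {α β : Type} [BEq β] (p : α → Bool) (f : α → β) :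
    ∀ (l : List α) (s : PySem.Set β),
      l.foldl (fun res a => if p a then PySem.Set.add res (f a) else res) s
        = PySem.Set.update s ((l.filter p).map f) := by
  intro l
  induction l with
  | nil => intro s; simp [PySem.Set.update]
  | cons a l ih =>
      intro s
      by_cases h : p a
      · simp [List.foldl_cons, h, ih, PySem.Set.update]
      · simp [List.foldl_cons, h, ih, PySem.Set.update]


theorem pvAstep_eq (x y z : String) (xn yn : Option String)
    (s : List String) (g : String × String × String × String) :
    pvAstep x y z xn yn s g =
      if ((x == g.2.1 || x == g.2.2.1) || (y == g.2.1 || y == g.2.2.1)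
          || (xn == some g.2.1 || xn == some g.2.2.1) || (yn == some g.2.1 || yn == some g.2.2.1))
          && (z != g.2.2.2)
        then PySem.Set.add s g.2.2.2 else s := by
  unfold pvAstep
  by_cases hz : z != g.2.2.2
  · by_cases h1 : (x == g.2.1 || x == g.2.2.1) = true <;>
    by_cases h2 : (y == g.2.1 || y == g.2.2.1) = true <;>
    by_cases h3 : (xn == some g.2.1 || xn == some g.2.2.1) = true <;>
    by_cases h4 : (yn == some g.2.1 || yn == some g.2.2.1) = true <;>
    simp [h1, h2, h3, h4, hz]
  · simp only [Bool.not_eq_true] at hz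
    simp [hz]


theorem pvCond_eq (x y z : String) (xn yn : Option String) (T : List String)
    (hT : ∀ s : String, s ∈ T ↔ (x = s ∨ y = s ∨ xn = some s ∨ yn = some s))
    (g : String × String × String × String) :
    (((x == g.2.1 || x == g.2.2.1) || (y == g.2.1 || y == g.2.2.1)
        || (xn == some g.2.1 || xn == some g.2.2.1) || (yn == some g.2.1 || yn == some g.2.2.1))
        && (z != g.2.2.2)) = pvCond T z g := by
  apply Bool.eq_iff_iff.mpr
  simp only [pvCond, pvMatch, Bool.and_eq_true, Bool.or_eq_true, beq_iff_eq,
    List.contains_eq_mem, decide_eq_true_eq, bne_iff_ne]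
  constructor
  · rintro ⟨hm, hne⟩
    refine ⟨?_, fun hzz => hne hzz.symm⟩
    have hre : (x = g.2.1 ∨ y = g.2.1 ∨ xn = some g.2.1 ∨ yn = some g.2.1)
        ∨ (x = g.2.2.1 ∨ y = g.2.2.1 ∨ xn = some g.2.2.1 ∨ yn = some g.2.2.1) := by tauto
    rcases hre with h | h
    · exact Or.inl ((hT _).mpr h)
    · exact Or.inr ((hT _).mpr h)
  · rintro ⟨hm, hne⟩
    refine ⟨?_, fun hzz => hne hzz.symm⟩
    rcases hm with h | h
    · have := (hT _).mp h; tauto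
    · have := (hT _).mp h; tauto


theorem pv_index_getD :
    ∀ (l : List (Int × (String × String × String × String))) (d : PySem.Dict String (List Int)) (t : String),
      (l.foldl pvIndexStep d).getD t []
        = d.getD t [] ++ l.flatMap (fun p =>
            (if p.2.2.1 == t then [p.1] else []) ++ (if p.2.2.2.1 == t then [p.1] else [])) := by
  intro l
  induction l with
  | nil => intro d t; simp
  | cons p l ih =>
      intro d t
      rw [List.foldl_cons, ih]
      have hstep : (pvIndexStep d p).getD t []
          = d.getD t [] ++ ((if p.2.2.1 == t then [p.1] else []) ++ (if p.2.2.2.1 == t then [p.1] else [])) := by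
        unfold pvIndexStep
        rcases eq_or_ne t p.2.2.1 with h1 | h1 <;> rcases eq_or_ne t p.2.2.2.1 with h2 | h2
        · subst h2; simp [← h1]
        · subst h1; simp [PySem.Dict.getD_modify, beq_iff_eq, h2, Ne.symm h2]
        · subst h2; simp [PySem.Dict.getD_modify, beq_iff_eq, h1, Ne.symm h1]
        · simp [PySem.Dict.getD_modify, beq_iff_eq, h1, h2, Ne.symm h1, Ne.symm h2]
      rw [List.flatMap_cons, hstep, List.append_assoc]


theorem pv_hits_mem (idx : String → List Int) :
    ∀ (T : List String) (s : PySem.Set Int) (i : Int),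
      (i ∈ T.foldl (fun s t => PySem.Set.update s (idx t)) s) ↔ i ∈ s ∨ ∃ t ∈ T, i ∈ idx t := by
  intro T
  induction T with
  | nil => intro s i; simp
  | cons t T ih =>
      intro s i
      rw [List.foldl_cons, ih]
      simp only [PySem.Set.mem_update, List.mem_cons]
      constructor
      · rintro (⟨h|h⟩|⟨u,hu,hi⟩)
        · exact Or.inl h
        · exact Or.inr ⟨t, Or.inl rfl, h⟩
        · exact Or.inr ⟨u, Or.inr hu, hi⟩
      · rintro (h|⟨u,(rfl|hu),hi⟩)
        · exact Or.inl (Or.inl h)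
        · exact Or.inl (Or.inr hi)
        · exact Or.inr ⟨u, hu, hi⟩


theorem pv_hits_nodup (idx : String → List Int) :
    ∀ (T : List String) (s : PySem.Set Int), s.Nodup →
      (T.foldl (fun s t => PySem.Set.update s (idx t)) s).Nodup := by
  intro T
  induction T with
  | nil => intro s h; exact h
  | cons t T ih =>
      intro s h
      exact ih _ (PySem.Set.nodup_update _ _ h)


theorem pv_enum_filter_map {β : Type} (Q : (String × String × String × String) → Bool)
    (R : (String × String × String × String) → β) :
    ∀ (gates : List (String × String × String × String)) (s : Int),
      (((PySem.List.enumerate gates s).filter (fun p => Q p.2)).map (fun p => R p.2))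
        = (gates.filter Q).map R := by
  intro gates
  induction gates with
  | nil => intro s; simp [PySem.List.enumerate_nil]
  | cons g gates ih =>
      intro s
      rw [PySem.List.enumerate_cons]
      by_cases h : Q g <;> simp [h, ih]


theorem pv_pyGetD_enum (gates : List (String × String × String × String))
    (p : Int × (String × String × String × String))
    (h : p ∈ PySem.List.enumerate gates 0) (d : String × String × String × String) :
    PySem.List.pyGetD gates p.1 d = p.2 := by
  rw [PySem.List.mem_enumerate_iff] at h
  obtain ⟨k, hk, rfl⟩ := h
  simp [PySem.List.pyGetD_natCast, hk]


theorem pv_main (gates : List (String × String × String × String)) (x y z : String)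
    (xn yn : Option String) (T : List String)
    (hT : ∀ s : String, s ∈ T ↔ (x = s ∨ y = s ∨ xn = some s ∨ yn = some s)) :
    gates.foldl (pvAstep x y z xn yn) PySem.Set.empty =
      (PySem.List.sorted
          (T.foldl (fun s t => PySem.Set.update s
              (((PySem.List.enumerate gates 0).foldl pvIndexStep PySem.Dict.empty).getD t []))
            PySem.Set.empty)
          (fun i => i) false).foldl
        (fun res i =>
          if (PySem.List.pyGetD gates i ("", "", "", "")).2.2.2 != z
            then PySem.Set.add res ((PySem.List.pyGetD gates i ("", "", "", "")).2.2.2) else res)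
        PySem.Set.empty := by
  have hstep : pvAstep x y z xn yn = (fun s g => if pvCond T z g then PySem.Set.add s g.2.2.2 else s) := by
    funext s g
    rw [pvAstep_eq, pvCond_eq x y z xn yn T hT]
  rw [hstep, pv_foldl_condAdd (pvCond T z) (fun g => g.2.2.2)]
  set enumG := PySem.List.enumerate gates 0 with henumG
  set hits := T.foldl (fun s t => PySem.Set.update s ((enumG.foldl pvIndexStep PySem.Dict.empty).getD t [])) PySem.Set.empty with hhits
  set cand := (enumG.filter (fun p => pvMatch T p.2)).map (fun p => p.1) with hcand
  have hidx : ∀ t, ((enumG.foldl pvIndexStep PySem.Dict.empty).getD t [])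
      = enumG.flatMap (fun p => (if p.2.2.1 == t then [p.1] else []) ++ (if p.2.2.2.1 == t then [p.1] else [])) := by
    intro t; rw [pv_index_getD]; simp
  have hget : ∀ p ∈ enumG, PySem.List.pyGetD gates p.1 ("", "", "", "") = p.2 :=
    fun p hp => pv_pyGetD_enum gates p hp _
  have hmem : ∀ i : Int, i ∈ hits ↔ i ∈ cand := by
    intro i
    rw [hhits, pv_hits_mem]
    simp only [hidx, List.mem_flatMap, List.mem_append, List.mem_ite_nil_right, List.mem_singleton,
      hcand, List.mem_map, List.mem_filter, pvMatch, Bool.or_eq_true, List.contains_eq_mem,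
      decide_eq_true_eq, beq_iff_eq]
    constructor
    · rintro (h | ⟨t, ht, p, hp, (⟨he, rfl⟩ | ⟨he, rfl⟩)⟩)
      · exact absurd h (by simp [PySem.Set.empty])
      · exact ⟨p, ⟨hp, Or.inl (by rw [he]; exact ht)⟩, rfl⟩
      · exact ⟨p, ⟨hp, Or.inr (by rw [he]; exact ht)⟩, rfl⟩
    · rintro ⟨p, ⟨hp, (h | h)⟩, rfl⟩
      · exact Or.inr ⟨p.2.2.1, h, p, hp, Or.inl ⟨rfl, rfl⟩⟩
      · exact Or.inr ⟨p.2.2.2.1, h, p, hp, Or.inr ⟨rfl, rfl⟩⟩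
  have hnodupHits : hits.Nodup := by
    rw [hhits]; exact pv_hits_nodup _ T PySem.Set.empty (by simp [PySem.Set.empty])
  have hpairCand : cand.Pairwise (fun a b => a < b) := by
    rw [hcand]
    exact List.Pairwise.map _ (fun a b h => h) ((PySem.List.pairwise_lt_enumerate gates 0).filter _)
  have hnodupCand : cand.Nodup := hpairCand.imp (fun h => Int.ne_of_lt h)
  have hperm : cand.Perm hits := (List.perm_ext_iff_of_nodup hnodupCand hnodupHits).mpr (fun a => (hmem a).symm)
  rw [PySem.List.sorted_eq_of_perm_of_pairwise_lt hits cand _ hperm hpairCand]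
  rw [pv_foldl_condAdd (fun i => (PySem.List.pyGetD gates i ("", "", "", "")).2.2.2 != z)
        (fun i => (PySem.List.pyGetD gates i ("", "", "", "")).2.2.2)]
  have hpred : ∀ p ∈ enumG,
      (((fun i => (PySem.List.pyGetD gates i ("", "", "", "")).2.2.2 != z) ∘ Prod.fst) p
        && pvMatch T p.2) = pvCond T z p.2 := by
    intro p hp
    simp only [Function.comp_apply, hget p hp, pvCond]
    exact Bool.and_comm _ _
  have hlist : (cand.filter (fun i => (PySem.List.pyGetD gates i ("", "", "", "")).2.2.2 != z)).map
        (fun i => (PySem.List.pyGetD gates i ("", "", "", "")).2.2.2)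
      = (gates.filter (pvCond T z)).map (fun g => g.2.2.2) := by
    rw [hcand, List.filter_map, List.map_map, List.filter_filter, List.filter_congr hpred]
    rw [List.map_congr_left
      (g := fun (p : Int × (String × String × String × String)) => (fun g : String × String × String × String => g.2.2.2) p.2)
      (fun p hp => by
        simp only [Function.comp_apply]
        rw [hget p (List.mem_filter.mp hp).1])]
    exact pv_enum_filter_map (pvCond T z) (fun g => g.2.2.2) gates 0
  rw [hlist]


-- ===== VERDICT (by name: the statement is the Claim_ definition above) =====
theorem get_possible_output_swaps_spec : Claim_equal_get_possible_output_swaps := by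
  intro gates output _
  unfold Spec_get_possible_output_swaps get_possible_output_swaps get_possible_output_swaps_alt
  cases hf : gates.find? (fun g => g.2.2.2 == output) with
  | none => rfl
  | some gate =>
      simp only
      by_cases hz : PySem.Str.startswith gate.2.2.2 "z" = true
      · simp only [hz, if_pos]
        exact pv_main gates _ _ _ _ _ _ (by intro s; simp [eq_comm])
      · simp only [hz, if_neg, Bool.false_eq_true, not_false_iff]
        exact pv_main gates _ _ _ _ _ _ (by intro s; simp [eq_comm])
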